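-- pv_equiv track=rewrite | github.com/abornntec/A01795190_A4.2 | P2/convertNumbers.py | convertir_negativo_a_hexadecimal
-- ===== SOURCE A (Python) =====
-- def convertir_positivo_a_binario(numero):
--     """Convertir numero positivos a binario"""
--     bits = []
--     while numero > 0:
--         bits.append(str(numero % 2))
--         numero = numero // 2
--     binario_convertido = ''.join(bits[::-1])
--     return binario_convertido
--
-- def sumar_uno_binario(binario_a_sumar):
--     """Sumar unos a binario para numeros negativos"""
--     binario_a_sumar = list(binario_a_sumar)
--     carry = 1
--
--     for i in range(len(binario_a_sumar) - 1, -1, -1):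
--         if binario_a_sumar[i] == '0':
--             binario_a_sumar[i] = '1'
--             carry = 0
--             break
--         binario_a_sumar[i] = '0'
--
--     if carry == 1:
--         binario_a_sumar.insert(0, '1')
--
--     return ''.join(binario_a_sumar)
--
-- def convertir_positivo_a_hexadecimal(numero):
--     """Convertir numero positivo a hexadecimal"""
--     bits = []
--     while numero > 0:
--         bit = numero % 16
--         bits.append(convertir_a_hex(bit))
--         numero //= 16
--     hexadecimal = ''.join(bits[::-1])
--     return hexadecimal
--
-- def convertir_negativo_a_hexadecimal(numero):
--     """Convertir numero negativo a hexadecimal"""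
--     positivo_binario = convertir_positivo_a_binario(abs(numero)).zfill(40)
--     complemento_uno = ''.join(
--         '1' if bit == '0' else '0' for bit in positivo_binario
--     )
--     complemento_dos = sumar_uno_binario(complemento_uno)
--     numero_decimal = int(complemento_dos, 2)
--     return convertir_positivo_a_hexadecimal(numero_decimal).zfill(40 // 4)
--
-- def convertir_a_hex(valor):
--     """Convertir digito a valor hexadecimal"""
--     if 0 <= valor <= 9:
--         return str(valor)
--     return chr(ord('A') + valor - 10)
-- ===== SOURCE B (Python) =====
-- def convertir_negativo_a_hexadecimal(numero):
--     """40-bit (or wider) two's complement hex, computed directly by subtraction."""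
--     v = abs(numero)
--     nd = 2 ** max(40, v.bit_length()) - v
--     return format(nd, 'X').zfill(10)
-- ===== Notes on version B (the rewrite author's own statement) =====
-- stated objective: simpler
-- what changed: B computes the two's-complement value arithmetically as one subtraction of abs(numero) from a power of two of width max(40, bit_length) and formats it with the built-in format(nd,'X'), replacing A's manual binary-string construction, char-by-char one's complement, ripple-carry add-one, re-parse and manual hex loop.
import Mathlib
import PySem

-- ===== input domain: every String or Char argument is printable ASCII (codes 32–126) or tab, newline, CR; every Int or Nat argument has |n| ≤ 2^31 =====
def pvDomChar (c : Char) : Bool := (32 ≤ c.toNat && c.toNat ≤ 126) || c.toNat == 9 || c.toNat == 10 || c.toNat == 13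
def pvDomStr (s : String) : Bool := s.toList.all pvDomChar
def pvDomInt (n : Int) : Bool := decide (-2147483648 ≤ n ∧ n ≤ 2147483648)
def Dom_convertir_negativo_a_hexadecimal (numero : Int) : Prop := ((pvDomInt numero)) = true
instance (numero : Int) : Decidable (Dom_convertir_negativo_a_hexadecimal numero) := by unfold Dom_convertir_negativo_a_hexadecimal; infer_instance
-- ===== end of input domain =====

-- B replaces A's binary-string build / flip / ripple-carry add / manual hex loop by one
-- arithmetic subtraction of |n| from a power of two of width max(40, bit_length),
-- formatted as uppercase hex (objective: simpler).

-- ===== PORT A =====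

-- while numero > 0: bits.append(str(numero % 2)); numero //= 2   (bits held lsb-first)
def pvA_binLoop (numero : Int) (bits : List (List Char)) : List (List Char) :=
  if h : 0 < numero then
    pvA_binLoop (PySem.Int.floordiv numero 2) (bits ++ [PySem.Int.toChars (PySem.Int.mod numero 2)])
  else bits
termination_by numero.toNat
decreasing_by
  rw [PySem.Int.floordiv_eq_ediv_of_pos (by omega)]
  omega

-- convertir_positivo_a_binario, on char lists (''.join(bits[::-1]))
def pvA_bin (numero : Int) : List Char :=
  PySem.Chars.join [] ((pvA_binLoop numero []).reverse)

-- the for-loop of sumar_uno_binario walks from the last index towards 0; ported as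
-- structural recursion over the reversed list: returns (processed reversed list, carry)
def pvA_sumRev : List Char → List Char × Nat
  | [] => ([], 1)
  | c :: rest =>
    if c = '0' then ('1' :: rest, 0)
    else
      match pvA_sumRev rest with
      | (r, k) => ('0' :: r, k)

-- sumar_uno_binario (carry == 1 → insert(0, '1'))
def pvA_sumarUno (s : List Char) : List Char :=
  match pvA_sumRev s.reverse with
  | (r, carry) => if carry = 1 then '1' :: r.reverse else r.reverse

-- convertir_a_hex: chr(ord('A') + valor - 10) for 10..15, str(valor) otherwise
def pvA_aHex (valor : Int) : List Char :=
  if 0 ≤ valor ∧ valor ≤ 9 then PySem.Int.toChars valor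
  else [Char.ofNat (65 + valor - 10).toNat]

-- while numero > 0: bits.append(convertir_a_hex(numero % 16)); numero //= 16
def pvA_hexLoop (numero : Int) (bits : List (List Char)) : List (List Char) :=
  if h : 0 < numero then
    pvA_hexLoop (PySem.Int.floordiv numero 16) (bits ++ [pvA_aHex (PySem.Int.mod numero 16)])
  else bits
termination_by numero.toNat
decreasing_by
  rw [PySem.Int.floordiv_eq_ediv_of_pos (by omega)]
  omega

-- convertir_positivo_a_hexadecimal, on char lists
def pvA_hex (numero : Int) : List Char :=
  PySem.Chars.join [] ((pvA_hexLoop numero []).reverse)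

-- int(s, 2); hand port, exact for nonempty strings of '0'/'1' digits, which
-- complemento_dos always is (no sign/space/underscore handling needed on those)
def pvA_parseBin (cs : List Char) : Int :=
  cs.foldl (fun a c => 2 * a + (if c = '1' then 1 else 0)) 0

def convertir_negativo_a_hexadecimal (numero : Int) : String :=
  let positivo_binario := PySem.Chars.zfill (pvA_bin |numero|) 40
  let complemento_uno := positivo_binario.map (fun bit => if bit = '0' then '1' else '0')
  let complemento_dos := pvA_sumarUno complemento_uno
  let numero_decimal := pvA_parseBin complemento_dos
  String.mk (PySem.Chars.zfill (pvA_hex numero_decimal) (PySem.Int.floordiv 40 4))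

-- ===== PORT B =====

-- one uppercase hex digit
def pvB_digit (d : Nat) : Char :=
  if d ≤ 9 then Char.ofNat (48 + d) else Char.ofNat (55 + d)

-- format(n, 'X'): uppercase hex, no prefix
def pvB_hexChars (n : Nat) : List Char :=
  if h : n < 16 then [pvB_digit n]
  else pvB_hexChars (n / 16) ++ [pvB_digit (n % 16)]
termination_by n
decreasing_by omega

def convertir_negativo_a_hexadecimal_alt (numero : Int) : String :=
  let v := numero.natAbs
  let nd := 2 ^ (max 40 (PySem.Int.bitLength (v : Int))) - v
  String.mk (PySem.Chars.zfill (pvB_hexChars nd) 10)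

-- ===== PRECONDITION & SPEC =====
def Spec_convertir_negativo_a_hexadecimal (numero : Int) (out : String) : Prop := out = convertir_negativo_a_hexadecimal_alt numero
instance (numero : Int) (out : String) : Decidable (Spec_convertir_negativo_a_hexadecimal numero out) := by unfold Spec_convertir_negativo_a_hexadecimal; infer_instance

-- ===== CLAIM (what is proved, stated in full; the proofs are below) =====
def Claim_equal_convertir_negativo_a_hexadecimal : Prop := ∀ (numero : Int), Dom_convertir_negativo_a_hexadecimal numero → Spec_convertir_negativo_a_hexadecimal numero (convertir_negativo_a_hexadecimal numero)

-- ===== LEMMAS AND PROOFS =====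

-- lsb-first binary digits of a Nat
def pvDigs : Nat → List Char
  | 0 => []
  | n + 1 => (if (n + 1) % 2 = 1 then '1' else '0') :: pvDigs ((n + 1) / 2)
decreasing_by omega

-- lsb-first base-16 digits of a Nat
def pvHexDigs : Nat → List Nat
  | 0 => []
  | n + 1 => ((n + 1) % 16) :: pvHexDigs ((n + 1) / 16)
decreasing_by omega

-- msb-first value of a binary char list
def pvParseN (cs : List Char) : Nat :=
  cs.foldl (fun a c => 2 * a + (if c = '1' then 1 else 0)) 0

-- lsb-first value of a binary char list
def pvParseL : List Char → Nat
  | [] => 0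
  | c :: cs => (if c = '1' then 1 else 0) + 2 * pvParseL cs

def pvIsBin (cs : List Char) : Prop := ∀ c ∈ cs, c = '0' ∨ c = '1'

theorem pvParseN_fold (cs : List Char) (a : Nat) :
    cs.foldl (fun a c => 2 * a + (if c = '1' then 1 else 0)) a
      = a * 2 ^ cs.length + pvParseN cs := by
  induction cs generalizing a with
  | nil => simp [pvParseN]
  | cons c cs ih =>
    simp only [List.foldl_cons, List.length_cons, pvParseN]
    rw [ih, ih ((2 : Nat) * 0 + if c = '1' then 1 else 0)]
    ring

theorem pvParseN_append_singleton (cs : List Char) (c : Char) :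
    pvParseN (cs ++ [c]) = 2 * pvParseN cs + (if c = '1' then 1 else 0) := by
  unfold pvParseN
  rw [List.foldl_append]
  simp

theorem pvParseN_reverse (cs : List Char) : pvParseN cs.reverse = pvParseL cs := by
  induction cs with
  | nil => rfl
  | cons c cs ih =>
    rw [List.reverse_cons, pvParseN_append_singleton, ih, pvParseL]
    ring

theorem pvParseN_replicate_append (k : Nat) (cs : List Char) :
    pvParseN (List.replicate k '0' ++ cs) = pvParseN cs := by
  induction k with
  | zero => simp
  | succ k ih => simpa [List.replicate_succ, pvParseN, List.foldl_cons] using ih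

theorem pvA_binLoop_eq (n : Nat) (bits : List (List Char)) :
    pvA_binLoop (n : Int) bits = bits ++ (pvDigs n).map (fun c => [c]) := by
  induction n using Nat.strong_induction_on generalizing bits with
  | _ n ih =>
    rw [pvA_binLoop]
    rcases Nat.eq_zero_or_pos n with h0 | hpos
    · subst h0; simp [pvDigs]
    · have h2 : PySem.Int.floordiv (n : Int) 2 = ((n / 2 : Nat) : Int) := by
        exact_mod_cast PySem.Int.floordiv_natCast n 2
      have hm : PySem.Int.mod (n : Int) 2 = ((n % 2 : Nat) : Int) := by
        exact_mod_cast PySem.Int.mod_natCast n 2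
      rw [dif_pos (by exact_mod_cast hpos), h2, hm, ih (n / 2) (by omega)]
      obtain ⟨m, rfl⟩ : ∃ m, n = m + 1 := ⟨n - 1, by omega⟩
      rw [pvDigs]
      have t0 : PySem.Int.toChars (0 : Int) = ['0'] := by decide
      have t1 : PySem.Int.toChars (1 : Int) = ['1'] := by decide
      rcases Nat.mod_two_eq_zero_or_one (m + 1) with he | he <;> rw [he] <;>
        simp [t0, t1]

theorem pvA_bin_eq (n : Nat) : pvA_bin (n : Int) = (pvDigs n).reverse := by
  unfold pvA_bin
  rw [pvA_binLoop_eq, List.nil_append, ← List.map_reverse,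
    PySem.Chars.join_nil_singletons]

theorem pvParseN_digs_reverse (n : Nat) : pvParseN (pvDigs n).reverse = n := by
  induction n using Nat.strong_induction_on with
  | _ n ih =>
    rcases Nat.eq_zero_or_pos n with h0 | hpos
    · subst h0; simp [pvDigs, pvParseN]
    · obtain ⟨m, rfl⟩ : ∃ m, n = m + 1 := ⟨n - 1, by omega⟩
      rw [pvDigs, List.reverse_cons, pvParseN_append_singleton, ih ((m + 1) / 2) (by omega)]
      rcases Nat.mod_two_eq_zero_or_one (m + 1) with he | he <;> rw [he] <;> simp <;> omega

theorem pvDigs_length (n : Nat) : (pvDigs n).length = PySem.Int.bitLength (n : Int) := by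
  induction n using Nat.strong_induction_on with
  | _ n ih =>
    rcases Nat.eq_zero_or_pos n with h0 | hpos
    · subst h0; simp [pvDigs]
    · obtain ⟨m, rfl⟩ : ∃ m, n = m + 1 := ⟨n - 1, by omega⟩
      rw [pvDigs, List.length_cons, ih ((m + 1) / 2) (by omega),
        PySem.Int.bitLength_natCast hpos]

theorem pvDigs_isBin (n : Nat) : pvIsBin (pvDigs n) := by
  induction n using Nat.strong_induction_on with
  | _ n ih =>
    rcases Nat.eq_zero_or_pos n with h0 | hpos
    · subst h0; intro c hc; simp [pvDigs] at hc
    · obtain ⟨m, rfl⟩ : ∃ m, n = m + 1 := ⟨n - 1, by omega⟩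
      rw [pvDigs]
      intro c hc
      rcases List.mem_cons.mp hc with h | h
      · subst h; split <;> simp
      · exact ih ((m + 1) / 2) (by omega) c h

theorem pvBitLength_le (k n : Nat) (h : n < 2 ^ k) : PySem.Int.bitLength (n : Int) ≤ k := by
  induction k generalizing n with
  | zero =>
    interval_cases n
    simp [PySem.Int.bitLength_zero]
  | succ k ih =>
    rcases Nat.eq_zero_or_pos n with h0 | hpos
    · subst h0; simp [PySem.Int.bitLength_zero]
    · rw [PySem.Int.bitLength_natCast hpos]
      have : n / 2 < 2 ^ k := by
        rw [pow_succ] at h; omega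
      exact Nat.succ_le_succ (ih _ this)

theorem pvZfill_eq (cs : List Char) (w : Nat) (hb : pvIsBin cs) :
    PySem.Chars.zfill cs (w : Int) = List.replicate (w - cs.length) '0' ++ cs := by
  unfold PySem.Chars.zfill
  by_cases hle : (w : Int) ≤ (cs.length : Int)
  · rw [if_pos hle]
    have h0 : w - cs.length = 0 := by
      have : w ≤ cs.length := by exact_mod_cast hle
      omega
    rw [h0]; simp
  · rw [if_neg hle]
    match cs with
    | [] => simp
    | c :: rest =>
      have hc : ¬ (c = '+' ∨ c = '-') := by
        rcases hb c (List.mem_cons_self) with h | h <;> subst h <;> simp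
      show (if c = '+' ∨ c = '-' then
              c :: (List.replicate ((w : Int).toNat - (c :: rest).length) '0' ++ rest)
            else List.replicate ((w : Int).toNat - (c :: rest).length) '0' ++ (c :: rest))
          = List.replicate (w - (c :: rest).length) '0' ++ (c :: rest)
      rw [if_neg hc]
      simp only [Int.toNat_natCast]

theorem pvParseN_lt (cs : List Char) : pvParseN cs < 2 ^ cs.length := by
  induction cs using List.reverseRecOn with
  | nil => simp [pvParseN]
  | append_singleton cs c ih =>
    rw [pvParseN_append_singleton]
    simp only [List.length_append, List.length_singleton, pow_succ]
    split <;> omega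

theorem pvParseN_flip (cs : List Char) (hb : pvIsBin cs) :
    pvParseN (cs.map (fun bit => if bit = '0' then '1' else '0'))
      = 2 ^ cs.length - 1 - pvParseN cs := by
  induction cs using List.reverseRecOn with
  | nil => simp [pvParseN]
  | append_singleton cs c ih =>
    have hb' : pvIsBin cs := fun x hx => hb x (List.mem_append_left _ hx)
    have hlt := pvParseN_lt cs
    rw [List.map_append, List.map_singleton, pvParseN_append_singleton,
      pvParseN_append_singleton, ih hb']
    have hc := hb c (List.mem_append_right _ (List.mem_cons_self))
    simp only [List.length_append, List.length_singleton, pow_succ]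
    rcases hc with h | h <;> subst h <;> simp <;> omega

theorem pvSumRev_spec (r : List Char) (hb : pvIsBin r) :
    ((pvA_sumRev r).2 = 0 ∧ pvParseL (pvA_sumRev r).1 = pvParseL r + 1) ∨
    ((pvA_sumRev r).2 = 1 ∧ (pvA_sumRev r).1 = List.replicate r.length '0' ∧
      pvParseL r = 2 ^ r.length - 1) := by
  induction r with
  | nil => right; simp [pvA_sumRev, pvParseL]
  | cons c rest ih =>
    have hb' : pvIsBin rest := fun x hx => hb x (List.mem_cons_of_mem _ hx)
    rcases hb c (List.mem_cons_self) with h | h <;> subst h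
    · left
      simp [pvA_sumRev, pvParseL]
      omega
    · rcases hE : pvA_sumRev rest with ⟨r', k⟩
      rcases ih hb' with ⟨h0, hp⟩ | ⟨h1, hrep, hp⟩
      · left
        rw [hE] at h0 hp
        dsimp only at h0 hp
        subst h0
        constructor
        · simp [pvA_sumRev, hE]
        · simp [pvA_sumRev, hE, pvParseL]
          omega
      · right
        rw [hE] at h1 hrep
        dsimp only at h1 hrep
        subst h1; subst hrep
        refine ⟨by simp [pvA_sumRev, hE], by simp [pvA_sumRev, hE, List.replicate_succ], ?_⟩
        have hpow : (0:Nat) < 2 ^ rest.length := Nat.two_pow_pos _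
        simp only [pvParseL, List.length_cons, hp, pow_succ]
        norm_num
        omega

theorem pvSumarUno_spec (l : List Char) (hb : pvIsBin l) :
    pvParseN (pvA_sumarUno l) = pvParseN l + 1 := by
  have hbr : pvIsBin l.reverse := fun x hx => hb x (List.mem_reverse.mp hx)
  unfold pvA_sumarUno
  have hl : pvParseN l = pvParseL l.reverse := by
    rw [← pvParseN_reverse, List.reverse_reverse]
  rcases hE : pvA_sumRev l.reverse with ⟨r', k⟩
  rcases pvSumRev_spec l.reverse hbr with ⟨h0, hp⟩ | ⟨h1, hrep, hp⟩
  · rw [hE] at h0 hp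
    dsimp only at h0 hp
    subst h0
    dsimp only
    rw [if_neg (by norm_num)]
    rw [pvParseN_reverse, hp, hl]
  · rw [hE] at h1 hrep
    dsimp only at h1 hrep
    subst h1; subst hrep
    dsimp only
    rw [if_pos rfl, List.reverse_replicate]
    have : pvParseN ('1' :: List.replicate l.reverse.length '0')
        = 2 ^ l.reverse.length := by
      show List.foldl _ 0 _ = _
      rw [List.foldl_cons]
      rw [pvParseN_fold]
      have : pvParseN (List.replicate l.reverse.length '0') = 0 := by
        simpa using pvParseN_replicate_append l.reverse.length []
      rw [this]
      simp
    rw [this, hl, hp]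
    have hpow : (0:Nat) < 2 ^ l.reverse.length := Nat.two_pow_pos _
    omega

theorem pvA_parseBin_eq (cs : List Char) : pvA_parseBin cs = (pvParseN cs : Int) := by
  suffices h : ∀ a : Nat, cs.foldl (fun a c => 2 * a + (if c = '1' then 1 else 0)) (a : Int)
      = ((cs.foldl (fun a c => 2 * a + (if c = '1' then 1 else 0)) a : Nat) : Int) by
    simpa using h 0
  induction cs with
  | nil => intro a; simp
  | cons c cs ih =>
    intro a
    simp only [List.foldl_cons]
    have : (2 * (a : Int) + (if c = '1' then 1 else 0))
        = ((2 * a + (if c = '1' then 1 else 0) : Nat) : Int) := by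
      split <;> push_cast <;> ring
    rw [this, ih]

theorem pvHexDigs_lt (n : Nat) : ∀ d ∈ pvHexDigs n, d < 16 := by
  induction n using Nat.strong_induction_on with
  | _ n ih =>
    rcases Nat.eq_zero_or_pos n with h0 | hpos
    · subst h0; intro d hd; simp [pvHexDigs] at hd
    · obtain ⟨m, rfl⟩ : ∃ m, n = m + 1 := ⟨n - 1, by omega⟩
      rw [pvHexDigs]
      intro d hd
      rcases List.mem_cons.mp hd with h | h
      · subst h; omega
      · exact ih ((m + 1) / 16) (by omega) d h

theorem pvA_aHex_eq (d : Nat) (hd : d < 16) : pvA_aHex (d : Int) = [pvB_digit d] := by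
  interval_cases d <;> decide

theorem pvA_hexLoop_eq (n : Nat) (bits : List (List Char)) :
    pvA_hexLoop (n : Int) bits = bits ++ (pvHexDigs n).map (fun (d : Nat) => pvA_aHex (d : Int)) := by
  induction n using Nat.strong_induction_on generalizing bits with
  | _ n ih =>
    rw [pvA_hexLoop]
    rcases Nat.eq_zero_or_pos n with h0 | hpos
    · subst h0; simp [pvHexDigs]
    · have h2 : PySem.Int.floordiv (n : Int) 16 = ((n / 16 : Nat) : Int) := by
        exact_mod_cast PySem.Int.floordiv_natCast n 16
      have hm : PySem.Int.mod (n : Int) 16 = ((n % 16 : Nat) : Int) := by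
        exact_mod_cast PySem.Int.mod_natCast n 16
      rw [dif_pos (by exact_mod_cast hpos), h2, hm, ih (n / 16) (by omega)]
      obtain ⟨m, rfl⟩ : ∃ m, n = m + 1 := ⟨n - 1, by omega⟩
      rw [pvHexDigs]
      simp

theorem pvA_hex_eq (n : Nat) : pvA_hex (n : Int) = ((pvHexDigs n).reverse).map pvB_digit := by
  unfold pvA_hex
  rw [pvA_hexLoop_eq, List.nil_append]
  have h1 : (pvHexDigs n).map (fun (d : Nat) => pvA_aHex (d : Int))
      = (pvHexDigs n).map (fun d => [pvB_digit d]) :=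
    List.map_congr_left fun d hd => pvA_aHex_eq d (pvHexDigs_lt n d hd)
  have h2 : (pvHexDigs n).map (fun d => [pvB_digit d])
      = ((pvHexDigs n).map pvB_digit).map (fun c => [c]) := by
    rw [List.map_map]
    rfl
  rw [h1, h2, ← List.map_reverse, PySem.Chars.join_nil_singletons, List.map_reverse]

theorem pvB_hexChars_eq (n : Nat) (hpos : 0 < n) :
    pvB_hexChars n = ((pvHexDigs n).reverse).map pvB_digit := by
  induction n using Nat.strong_induction_on with
  | _ n ih =>
    rw [pvB_hexChars]
    by_cases h16 : n < 16
    · rw [dif_pos h16]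
      obtain ⟨m, rfl⟩ : ∃ m, n = m + 1 := ⟨n - 1, by omega⟩
      rw [pvHexDigs]
      have hq : (m + 1) / 16 = 0 := by omega
      have hmod : (m + 1) % 16 = m + 1 := Nat.mod_eq_of_lt h16
      rw [hq, hmod]
      simp [pvHexDigs]
    · rw [dif_neg h16, ih (n / 16) (by omega) (by omega)]
      obtain ⟨m, rfl⟩ : ∃ m, n = m + 1 := ⟨n - 1, by omega⟩
      rw [pvHexDigs]
      simp

-- ===== VERDICT (by name: the statement is the Claim_ definition above) =====
theorem convertir_negativo_a_hexadecimal_spec : Claim_equal_convertir_negativo_a_hexadecimal := by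
  intro numero hdom
  unfold Spec_convertir_negativo_a_hexadecimal
  unfold convertir_negativo_a_hexadecimal convertir_negativo_a_hexadecimal_alt
  set v : Nat := numero.natAbs with hv
  have habs : |numero| = (v : Int) := Int.abs_eq_natAbs numero
  have hvle : v ≤ 2147483648 := by
    have := of_decide_eq_true hdom
    omega
  have hv40 : v < 2 ^ 40 := by
    have : (2147483648 : Nat) < 2 ^ 40 := by norm_num
    omega
  have hbl : PySem.Int.bitLength (v : Int) ≤ 40 := pvBitLength_le 40 v hv40
  -- the padded binary string
  have hlen : (pvDigs v).reverse.length ≤ 40 := by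
    rw [List.length_reverse, pvDigs_length]; exact hbl
  have hbinB : pvIsBin (pvDigs v).reverse := fun c hc =>
    pvDigs_isBin v c (List.mem_reverse.mp hc)
  have hzf : PySem.Chars.zfill (pvA_bin |numero|) 40
      = List.replicate (40 - (pvDigs v).reverse.length) '0' ++ (pvDigs v).reverse := by
    rw [habs, pvA_bin_eq]
    exact_mod_cast pvZfill_eq (pvDigs v).reverse 40 hbinB
  set pb : List Char :=
    List.replicate (40 - (pvDigs v).reverse.length) '0' ++ (pvDigs v).reverse with hpb
  have hpblen : pb.length = 40 := by
    rw [hpb]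
    simp only [List.length_append, List.length_replicate]
    omega
  have hpbbin : pvIsBin pb := by
    intro c hc
    rcases List.mem_append.mp hc with h | h
    · left; exact List.eq_of_mem_replicate h
    · exact hbinB c h
  have hpbval : pvParseN pb = v := by
    rw [hpb, pvParseN_replicate_append, pvParseN_digs_reverse]
  -- one's complement
  set c1 : List Char := pb.map (fun bit => if bit = '0' then '1' else '0') with hc1
  have hc1bin : pvIsBin c1 := by
    intro c hc
    rcases List.mem_map.mp hc with ⟨x, _, hx⟩
    subst hx; split <;> simp
  have hc1val : pvParseN c1 = 2 ^ 40 - 1 - v := by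
    rw [hc1, pvParseN_flip pb hpbbin, hpblen, hpbval]
  -- add one
  have hc2val : pvParseN (pvA_sumarUno c1) = 2 ^ 40 - v := by
    rw [pvSumarUno_spec c1 hc1bin, hc1val]
    omega
  -- the decimal value
  have hdec : pvA_parseBin (pvA_sumarUno c1) = ((2 ^ 40 - v : Nat) : Int) := by
    rw [pvA_parseBin_eq, hc2val]
  have hNpos : 0 < 2 ^ 40 - v := by
    have : (2147483648 : Nat) < 2 ^ 40 := by norm_num
    omega
  -- B's subtrahend
  have hmax : max 40 (PySem.Int.bitLength (v : Int)) = 40 := by omega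
  have hfd : PySem.Int.floordiv 40 4 = (10 : Int) := by decide
  simp only [hzf, ← hc1, hdec, hfd]
  rw [pvA_hex_eq (2 ^ 40 - v), ← pvB_hexChars_eq (2 ^ 40 - v) hNpos, hmax]
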